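-- pv_equiv track=rewrite | github.com/Kuisda/test1 | 1124. 表现良好的最长时间段/1.py | longestWPI
-- ===== SOURCE A (Python) =====
-- from typing import List
--
-- def longestWPI(hours: List[int]) -> int:
--     n = len(hours)
--     presum = [0]
--     cursum=0
--     for i in range(n):#获得前缀和数组
--         cursum += 1 if hours[i]>8 else -1
--         presum.append(cursum)
--
--     ans = 0
--     stack=[]
--     for i in range(len(presum)):#一个按照前缀和单调递减的栈，因为要找的是区间和大于0情况下的最大区间，也就是区间[i,j]要有presum[j]-presum[i]>0
--         #思考一个确定左端点i的问题，假设posi1在posi2的左边，但posi2的presum值还要比posi1大，则posi2肯定不能成为左端点，因为如果posi2满足presum[j]-presum[i]>0条件，则posi1肯定也满足且长度更长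
--         #所以从左往右扫描只能取递减的，然后再从后往前遍历右端点即可
--         if not stack or presum[stack[-1]]>presum[i]:
--             stack.append(i)
--     i = n
--     while i>ans:
--         while stack and presum[stack[-1]]<presum[i]:
--             ans = max(ans,i-stack[-1])
--             stack.pop()
--         i-=1
--
--
--     return ans
-- ===== SOURCE B (Python) =====
-- from typing import List
--
-- def longestWPI(hours: List[int]) -> int:
--     # single pass: running prefix sum + earliest index of each prefix-sum value
--     first = {}
--     cursum = 0
--     ans = 0
--     for i, h in enumerate(hours):
--         cursum += 1 if h > 8 else -1
--         if cursum > 0: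
--             ans = i + 1
--         elif cursum - 1 in first:
--             ans = max(ans, i - first[cursum - 1])
--         if cursum not in first:
--             first[cursum] = i
--     return ans
-- ===== Notes on version B (the rewrite author's own statement) =====
-- stated objective: idiomatic
-- what changed: Replaced the two-pass monotonic-stack scan (build a decreasing-prefix stack, then pop while walking right-to-left) by the standard single forward pass keeping a running prefix sum and a dict of the earliest index of each prefix-sum value.
import Mathlib
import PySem

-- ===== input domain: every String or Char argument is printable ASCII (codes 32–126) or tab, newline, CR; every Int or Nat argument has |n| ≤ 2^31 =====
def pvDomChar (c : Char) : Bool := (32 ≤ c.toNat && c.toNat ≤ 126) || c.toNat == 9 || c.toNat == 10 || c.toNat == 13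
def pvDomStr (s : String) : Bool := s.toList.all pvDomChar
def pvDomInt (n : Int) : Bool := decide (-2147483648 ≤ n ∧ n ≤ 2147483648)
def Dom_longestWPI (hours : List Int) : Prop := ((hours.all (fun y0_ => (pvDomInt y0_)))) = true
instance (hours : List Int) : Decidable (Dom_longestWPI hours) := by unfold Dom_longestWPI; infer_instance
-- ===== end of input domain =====

-- B replaces A's two-pass monotonic-stack scan by the standard single forward pass with a
-- running prefix sum and a dict of the earliest index of each prefix-sum value (same O(n) cost).

-- ===== PORT A =====
-- A's first loop: cursum accumulation appending to presum (loop over hours, as 'for i in range(n): hours[i]' visits exactly the elements).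
def presumOfA (hours : List Int) : Int × List Int :=
  hours.foldl
    (fun st h =>
      let c := st.1 + (if h > 8 then 1 else -1)
      (c, st.2 ++ [c]))
    (0, [0])

-- A's second loop: the monotonic stack; the Lean list's head is the Python stack's top
-- (append = cons, stack[-1] = head), a faithful encoding of push/pop/top.
def buildStackA (presum : List Int) : List Int :=
  (PySem.List.pyRange 0 presum.length 1).foldl
    (fun stack i =>
      match stack with
      | [] => [i]
      | t :: _ =>
        if PySem.List.pyGetD presum t 0 > PySem.List.pyGetD presum i 0 then i :: stack
        else stack)
    []

-- A's inner 'while stack and presum[stack[-1]]<presum[i]' loop (indices are always in range, so pyGetD's default is never read).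
def popLoopA (presum : List Int) (i : Int) (ans : Int) : List Int → Int × List Int
  | [] => (ans, [])
  | t :: rest =>
    if PySem.List.pyGetD presum t 0 < PySem.List.pyGetD presum i 0 then
      popLoopA presum i (max ans (i - t)) rest
    else (ans, t :: rest)

-- A's outer 'while i>ans: …; i-=1' loop, counting i down (ans stays ≥ 0, so i never goes below 0 in Python either).
def outerA (presum : List Int) : Nat → Int → List Int → Int
  | 0, ans, stack => if (0 : Int) > ans then (popLoopA presum 0 ans stack).1 else ans
  | (j+1), ans, stack =>
    if ((j : Int) + 1) > ans then
      let r := popLoopA presum ((j : Int) + 1) ans stack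
      outerA presum j r.1 r.2
    else ans

def longestWPI (hours : List Int) : Int :=
  let presum := (presumOfA hours).2
  let stack := buildStackA presum
  outerA presum hours.length 0 stack

-- ===== PORT B =====
def longestWPI_alt (hours : List Int) : Int :=
  let r :=
    (PySem.List.enumerate hours 0).foldl
      (fun (st : PySem.Dict Int Int × Int × Int) ih =>
        let cursum := st.2.1 + (if ih.2 > 8 then 1 else -1)
        let ans :=
          if cursum > 0 then ih.1 + 1
          else if st.1.contains (cursum - 1) then max st.2.2 (ih.1 - st.1.getD (cursum - 1) 0)
          else st.2.2
        let first := if st.1.contains cursum then st.1 else st.1.insert cursum ih.1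
        (first, cursum, ans))
      (PySem.Dict.empty, 0, 0)
  r.2.2

-- ===== PRECONDITION & SPEC =====
def Spec_longestWPI (hours : List Int) (out : Int) : Prop := out = longestWPI_alt hours
instance (hours : List Int) (out : Int) : Decidable (Spec_longestWPI hours out) := by unfold Spec_longestWPI; infer_instance

-- ===== CLAIM (what is proved, stated in full; the proofs are below) =====
def Claim_equal_longestWPI : Prop := ∀ (hours : List Int), Dom_longestWPI hours → Spec_longestWPI hours (longestWPI hours)

-- ===== LEMMAS AND PROOFS =====
-- Both programs compute, over the list p of prefix sums of the ±1 scores, the largest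
-- b - a with a < b < p.length and p[a] < p[b] (0 when there is none).  We characterise
-- that value by the three predicates below and prove each port satisfies them.

abbrev pvAt (p : List Int) (k : Int) : Int := PySem.List.pyGetD p k 0

def dstep (h : Int) : Int := if h > 8 then 1 else -1

-- the list [0, p₁, …, pₙ] of prefix sums starting at c
def psList (c : Int) : List Int → List Int
  | [] => [c]
  | h :: t => c :: psList (c + dstep h) t

def UBp (p : List Int) (r : Int) : Prop :=
  ∀ a b : Nat, a < b → b < p.length → p.getD a 0 < p.getD b 0 → (b : Int) - (a : Int) ≤ r

def ACHp (p : List Int) (r : Int) : Prop :=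
  r = 0 ∨ ∃ a b : Nat, a < b ∧ b < p.length ∧ p.getD a 0 < p.getD b 0 ∧ r = (b : Int) - (a : Int)

lemma pvAt_natCast (p : List Int) (k : Nat) : pvAt p (k : Int) = p.getD k 0 := by
  simp [pvAt]

lemma pvAt_toNat (p : List Int) {t : Int} (h : 0 ≤ t) : pvAt p t = p.getD t.toNat 0 := by
  conv_lhs => rw [show t = ((t.toNat : Nat) : Int) by omega]
  exact pvAt_natCast p t.toNat

lemma max_unique {p : List Int} {r1 r2 : Int}
    (h1 : 0 ≤ r1) (u1 : UBp p r1) (a1 : ACHp p r1)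
    (h2 : 0 ≤ r2) (u2 : UBp p r2) (a2 : ACHp p r2) : r1 = r2 := by
  rcases a1 with rfl | ⟨a1, b1, hab1, hb1, hp1, he1⟩
  · rcases a2 with rfl | ⟨a2, b2, hab2, hb2, hp2, he2⟩
    · rfl
    · have := u1 a2 b2 hab2 hb2 hp2; omega
  · have hle1 := u2 a1 b1 hab1 hb1 hp1
    rcases a2 with rfl | ⟨a2, b2, hab2, hb2, hp2, he2⟩
    · omega
    · have := u1 a2 b2 hab2 hb2 hp2; omega

-- ---- facts about psList ----

lemma psList_length (c : Int) (hs : List Int) : (psList c hs).length = hs.length + 1 := by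
  induction hs generalizing c with
  | nil => rfl
  | cons h t ih => simp [psList, ih]

lemma psList_getD_zero (c : Int) (hs : List Int) : (psList c hs).getD 0 0 = c := by
  cases hs <;> rfl

lemma psList_head_cons (c : Int) (hs : List Int) : psList c hs = c :: (psList c hs).tail := by
  cases hs <;> rfl

lemma psList_step (hs : List Int) : ∀ (c : Int) (k : Nat), k < hs.length →
    (psList c hs).getD (k + 1) 0 = (psList c hs).getD k 0 + dstep (hs.getD k 0) := by
  induction hs with
  | nil => intro c k hk; simp at hk
  | cons h t ih =>
    intro c k hk
    cases k with
    | zero =>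
      simp only [psList, List.getD_cons_succ, List.getD_cons_zero]
      exact psList_getD_zero _ _
    | succ k =>
      simp only [psList, List.getD_cons_succ]
      exact ih (c + dstep h) k (by simpa using hk)

lemma psList_snoc (x : Int) (hs : List Int) (c : Int) :
    psList c (hs ++ [x]) = psList c hs ++ [(psList c hs).getD hs.length 0 + dstep x] := by
  induction hs generalizing c with
  | nil => simp [psList]
  | cons h t ih =>
    simp only [List.cons_append, psList, List.length_cons, List.getD_cons_succ]
    rw [ih (c + dstep h)]

lemma presum_fold (hs : List Int) : ∀ (c : Int) (acc : List Int),
    (hs.foldl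
      (fun st h =>
        let c' := st.1 + (if h > 8 then 1 else -1)
        (c', st.2 ++ [c'])) (c, acc)).2
      = acc ++ (psList c hs).tail := by
  induction hs with
  | nil => intro c acc; simp [psList]
  | cons h t ih =>
    intro c acc
    simp only [List.foldl_cons]
    rw [ih]
    have hh : (if h > 8 then (1 : Int) else -1) = dstep h := rfl
    rw [hh]
    conv_rhs => rw [show psList c (h :: t) = c :: psList (c + dstep h) t from rfl,
      List.tail_cons, psList_head_cons (c + dstep h) t]
    simp

lemma presumOfA_snd (hs : List Int) : (presumOfA hs).2 = psList 0 hs := by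
  unfold presumOfA
  rw [presum_fold]
  conv_rhs => rw [psList_head_cons 0 hs]
  simp

-- discrete intermediate-value property of a ±1-step list
lemma ivt (p : List Int)
    (hstep : ∀ k : Nat, k + 1 < p.length →
      p.getD (k + 1) 0 = p.getD k 0 + 1 ∨ p.getD (k + 1) 0 = p.getD k 0 - 1) :
    ∀ (a : Nat) (v : Int), a < p.length → p.getD a 0 ≤ v → v ≤ p.getD 0 0 →
      ∃ t : Nat, t ≤ a ∧ p.getD t 0 = v := by
  intro a
  induction a with
  | zero => intro v h0 hle hge; exact ⟨0, le_refl 0, by omega⟩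
  | succ a ih =>
    intro v ha hle hge
    by_cases hv : p.getD (a + 1) 0 = v
    · exact ⟨a + 1, le_refl _, hv⟩
    · have hs' := hstep a ha
      obtain ⟨t, ht, htv⟩ := ih v (by omega) (by omega) hge
      exact ⟨t, by omega, htv⟩

lemma psList_pm (hs : List Int) (c : Int) (k : Nat) (h : k + 1 < (psList c hs).length) :
    (psList c hs).getD (k + 1) 0 = (psList c hs).getD k 0 + 1 ∨
      (psList c hs).getD (k + 1) 0 = (psList c hs).getD k 0 - 1 := by
  have hk : k < hs.length := by simpa [psList_length] using h
  have := psList_step hs c k hk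
  unfold dstep at this
  split at this <;> omega

-- ---- A side: the monotonic stack ----

-- a stack element a sits above b: larger index, smaller prefix value
def StkRel (p : List Int) (a b : Int) : Prop := b < a ∧ pvAt p a < pvAt p b

def buildStep (p : List Int) : List Int → Int → List Int := fun stack i =>
  match stack with
  | [] => [i]
  | t :: _ =>
    if PySem.List.pyGetD p t 0 > PySem.List.pyGetD p i 0 then i :: stack
    else stack

lemma buildStackA_eq (p : List Int) :
    buildStackA p = (PySem.List.pyRange 0 p.length 1).foldl (buildStep p) [] := rfl

lemma build_inv (p : List Int) : ∀ N : Nat,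
    ((PySem.List.pyRange 0 (N : Int) 1).foldl (buildStep p) []).Pairwise (StkRel p) ∧
    (∀ t ∈ (PySem.List.pyRange 0 (N : Int) 1).foldl (buildStep p) [], 0 ≤ t ∧ t < (N : Int)) ∧
    (∀ a : Nat, a < N → ∃ t ∈ (PySem.List.pyRange 0 (N : Int) 1).foldl (buildStep p) [],
      t ≤ (a : Int) ∧ pvAt p t ≤ pvAt p (a : Int)) := by
  intro N
  induction N with
  | zero =>
    rw [PySem.List.pyRange_one_eq_nil (by omega)]
    exact ⟨List.Pairwise.nil, by simp, by omega⟩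
  | succ N ih =>
    obtain ⟨hpw, hbd, hcomp⟩ := ih
    have hsplit : PySem.List.pyRange 0 ((N + 1 : Nat) : Int) 1
        = PySem.List.pyRange 0 (N : Int) 1 ++ [(N : Int)] := by
      push_cast
      exact PySem.List.pyRange_one_succ_right (by omega)
    rw [hsplit, List.foldl_append]
    generalize hgen : (PySem.List.pyRange 0 (N : Int) 1).foldl (buildStep p) [] = s
      at hpw hbd hcomp ⊢
    cases s with
    | nil =>
      have hN : N = 0 := by
        by_contra h
        obtain ⟨t, ht, -⟩ := hcomp 0 (Nat.pos_of_ne_zero h)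
        simp at ht
      subst hN
      refine ⟨by simp [buildStep], ?_, ?_⟩
      · intro t ht
        simp only [buildStep, List.foldl_cons, List.foldl_nil, List.mem_singleton] at ht
        subst ht
        constructor <;> omega
      · intro a ha
        have : a = 0 := by omega
        subst this
        exact ⟨0, by simp [buildStep], by simp, le_refl _⟩
    | cons t0 rest =>
      simp only [List.foldl_cons, List.foldl_nil, buildStep]
      split_ifs with hc
      · refine ⟨?_, ?_, ?_⟩
        · rw [List.pairwise_cons]
          refine ⟨?_, hpw⟩
          intro u hu
          refine ⟨(hbd u hu).2, ?_⟩
          have h0 : pvAt p t0 ≤ pvAt p u := by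
            rcases List.mem_cons.mp hu with rfl | hu'
            · exact le_refl _
            · exact le_of_lt ((List.pairwise_cons.mp hpw).1 u hu').2
          exact lt_of_lt_of_le hc h0
        · intro t ht
          rcases List.mem_cons.mp ht with rfl | ht'
          · constructor <;> omega
          · have := hbd t ht'
            constructor <;> omega
        · intro a ha
          rcases Nat.lt_succ_iff_lt_or_eq.mp ha with h | rfl
          · obtain ⟨t, ht, h1, h2⟩ := hcomp a h
            exact ⟨t, List.mem_cons_of_mem _ ht, h1, h2⟩
          · exact ⟨(a : Int), List.mem_cons_self, le_refl _, le_refl _⟩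
      · refine ⟨hpw, ?_, ?_⟩
        · intro t ht
          have := hbd t ht
          constructor <;> omega
        · intro a ha
          rcases Nat.lt_succ_iff_lt_or_eq.mp ha with h | rfl
          · exact hcomp a h
          · refine ⟨t0, List.mem_cons_self, ?_, not_lt.mp hc⟩
            have := (hbd t0 List.mem_cons_self).2
            omega

lemma popLoop_mono (p : List Int) (i : Int) :
    ∀ (s : List Int) (ans : Int), ans ≤ (popLoopA p i ans s).1 := by
  intro s
  induction s with
  | nil => intro ans; simp [popLoopA]
  | cons t rest ih =>
    intro ans
    simp only [popLoopA]
    split_ifs with hc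
    · exact le_trans (le_max_left _ _) (ih _)
    · exact le_refl _

lemma popLoop_sublist (p : List Int) (i : Int) :
    ∀ (s : List Int) (ans : Int), (popLoopA p i ans s).2.Sublist s := by
  intro s
  induction s with
  | nil => intro ans; simp [popLoopA]
  | cons t rest ih =>
    intro ans
    simp only [popLoopA]
    split_ifs with hc
    · exact List.Sublist.cons t (ih _)
    · exact List.Sublist.refl _

lemma popLoop_pops (p : List Int) (i : Int) :
    ∀ (s : List Int) (ans t : Int), s.Pairwise (StkRel p) → t ∈ s → pvAt p t < pvAt p i →
      i - t ≤ (popLoopA p i ans s).1 := by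
  intro s
  induction s with
  | nil => intro ans t _ hmem _; simp at hmem
  | cons u rest ih =>
    intro ans t hpw hmem hlt
    obtain ⟨hu, hpw'⟩ := List.pairwise_cons.mp hpw
    simp only [popLoopA]
    rcases List.mem_cons.mp hmem with rfl | hmem'
    · rw [if_pos hlt]
      exact le_trans (le_max_right _ _) (popLoop_mono p i rest _)
    · have hr := hu t hmem'
      rw [if_pos (lt_trans hr.2 hlt)]
      exact ih _ t hpw' hmem' hlt

lemma popLoop_mem_or (p : List Int) (i : Int) :
    ∀ (s : List Int) (ans t : Int), t ∈ s →
      t ∈ (popLoopA p i ans s).2 ∨ i - t ≤ (popLoopA p i ans s).1 := by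
  intro s
  induction s with
  | nil => intro ans t h; simp at h
  | cons u rest ih =>
    intro ans t hmem
    simp only [popLoopA]
    split_ifs with hc
    · rcases List.mem_cons.mp hmem with rfl | h'
      · exact Or.inr (le_trans (le_max_right _ _) (popLoop_mono p i rest _))
      · exact ih _ t h'
    · exact Or.inl hmem

lemma popLoop_ach (p : List Int) (i : Int) (hi0 : 0 ≤ i) (him : i < p.length) :
    ∀ (s : List Int) (ans : Int), 0 ≤ ans → ACHp p ans →
      (∀ t ∈ s, 0 ≤ t ∧ t < (p.length : Int)) →
      0 ≤ (popLoopA p i ans s).1 ∧ ACHp p (popLoopA p i ans s).1 := by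
  intro s
  induction s with
  | nil => intro ans h0 hach _; simpa [popLoopA] using ⟨h0, hach⟩
  | cons u rest ih =>
    intro ans h0 hach hbd
    have hu := hbd u List.mem_cons_self
    have hbd' : ∀ t ∈ rest, 0 ≤ t ∧ t < (p.length : Int) :=
      fun t ht => hbd t (List.mem_cons_of_mem _ ht)
    simp only [popLoopA]
    split_ifs with hc
    · by_cases hle : i - u ≤ ans
      · rw [max_eq_left hle]
        exact ih _ h0 hach hbd'
      · rw [max_eq_right (by omega)]
        refine ih _ (by omega) ?_ hbd'
        refine Or.inr ⟨u.toNat, i.toNat, by omega, by omega, ?_, by omega⟩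
        rw [← pvAt_toNat p hu.1, ← pvAt_toNat p hi0]
        exact hc
    · exact ⟨h0, hach⟩

-- every qualifying pair whose left end is in S0 is already counted in ans, or still pending
def Pend (p : List Int) (S0 : List Int) (i : Nat) (ans : Int) (s : List Int) : Prop :=
  ∀ (t : Int) (b : Nat), t ∈ S0 → t < (b : Int) → b < p.length → pvAt p t < p.getD b 0 →
    ((b : Int) - t ≤ ans ∨ ((b : Int) ≤ (i : Int) ∧ t ∈ s))

lemma outer_inv (p : List Int) (S0 : List Int) (hS0 : ∀ t ∈ S0, 0 ≤ t) :
    ∀ (i : Nat) (ans : Int) (s : List Int),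
      0 ≤ ans → ACHp p ans → s.Pairwise (StkRel p) →
      (∀ t ∈ s, 0 ≤ t ∧ t < (p.length : Int)) → i < p.length → Pend p S0 i ans s →
      0 ≤ outerA p i ans s ∧ ACHp p (outerA p i ans s) ∧
        ∀ (t : Int) (b : Nat), t ∈ S0 → t < (b : Int) → b < p.length → pvAt p t < p.getD b 0 →
          (b : Int) - t ≤ outerA p i ans s := by
  intro i
  induction i with
  | zero =>
    intro ans s h0 hach hpw hbd him hpend
    have hno : ¬ ((0 : Int) > ans) := by omega
    simp only [outerA, if_neg hno]
    refine ⟨h0, hach, ?_⟩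
    intro t b htS htb hbm hpv
    rcases hpend t b htS htb hbm hpv with h | ⟨hb0, _⟩
    · exact h
    · have := hS0 t htS; omega
  | succ i ih =>
    intro ans s h0 hach hpw hbd him hpend
    by_cases hcond : ((i : Int) + 1) > ans
    · have heq : outerA p (i + 1) ans s
          = outerA p i (popLoopA p ((i : Int) + 1) ans s).1 (popLoopA p ((i : Int) + 1) ans s).2 := by
        simp only [outerA, if_pos hcond]
      rw [heq]
      have hmono := popLoop_mono p ((i : Int) + 1) s ans
      have hsub := popLoop_sublist p ((i : Int) + 1) s ans
      obtain ⟨h0', hach'⟩ :=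
        popLoop_ach p ((i : Int) + 1) (by omega) (by omega) s ans h0 hach hbd
      refine ih (popLoopA p ((i : Int) + 1) ans s).1 (popLoopA p ((i : Int) + 1) ans s).2 h0'
        hach' (List.Pairwise.sublist hsub hpw) (fun t ht => hbd t (hsub.subset ht)) (by omega) ?_
      intro t b htS htb hbm hpv
      rcases hpend t b htS htb hbm hpv with hcnt | ⟨hble, hmem⟩
      · exact Or.inl (le_trans hcnt hmono)
      · by_cases hbi : (b : Int) ≤ (i : Int)
        · rcases popLoop_mem_or p ((i : Int) + 1) s ans t hmem with hm | hcn
          · exact Or.inr ⟨hbi, hm⟩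
          · exact Or.inl (by omega)
        · have hbeq : (b : Int) = (i : Int) + 1 := by omega
          refine Or.inl ?_
          have hlt : pvAt p t < pvAt p ((i : Int) + 1) := by
            rw [← hbeq, pvAt_natCast]
            exact hpv
          have := popLoop_pops p ((i : Int) + 1) s ans t hpw hmem hlt
          omega
    · have heq : outerA p (i + 1) ans s = ans := by
        simp only [outerA, if_neg hcond]
      rw [heq]
      refine ⟨h0, hach, ?_⟩
      intro t b htS htb hbm hpv
      rcases hpend t b htS htb hbm hpv with h | ⟨hble, _⟩
      · exact h
      · have := hS0 t htS; omega

lemma A_props (hours : List Int) :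
    0 ≤ longestWPI hours ∧ ACHp (psList 0 hours) (longestWPI hours) ∧
      UBp (psList 0 hours) (longestWPI hours) := by
  have hteq : longestWPI hours
      = outerA (psList 0 hours) hours.length 0 (buildStackA (psList 0 hours)) := by
    unfold longestWPI
    rw [presumOfA_snd]
  rw [hteq]
  set p := psList 0 hours with hpdef
  have hlen : p.length = hours.length + 1 := psList_length 0 hours
  obtain ⟨hpw, hbd, hcomp⟩ := build_inv p p.length
  rw [buildStackA_eq]
  set S0 := (PySem.List.pyRange 0 (p.length : Int) 1).foldl (buildStep p) [] with hS0def
  have hnn : ∀ t ∈ S0, 0 ≤ t := fun t ht => (hbd t ht).1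
  have hpend : Pend p S0 hours.length 0 S0 := by
    intro t b htS htb hbm hpv
    exact Or.inr ⟨by omega, htS⟩
  obtain ⟨h0, hach, hfull⟩ :=
    outer_inv p S0 hnn hours.length 0 S0 (le_refl 0) (Or.inl rfl) hpw hbd (by omega) hpend
  refine ⟨h0, hach, ?_⟩
  intro a b hab hbm hpv
  obtain ⟨t, htS, hta, htv⟩ := hcomp a (by omega)
  rw [pvAt_natCast] at htv
  have hpv' : pvAt p t < p.getD b 0 := lt_of_le_of_lt htv hpv
  have := hfull t b htS (by omega) hbm hpv'
  omega

-- ---- B side: prefix sums with a first-occurrence dict ----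

def bstep : PySem.Dict Int Int × Int × Int → Int × Int → PySem.Dict Int Int × Int × Int :=
  fun st ih =>
    let cursum := st.2.1 + (if ih.2 > 8 then 1 else -1)
    let ans :=
      if cursum > 0 then ih.1 + 1
      else if st.1.contains (cursum - 1) then max st.2.2 (ih.1 - st.1.getD (cursum - 1) 0)
      else st.2.2
    let first := if st.1.contains cursum then st.1 else st.1.insert cursum ih.1
    (first, cursum, ans)

lemma alt_eq (hours : List Int) :
    longestWPI_alt hours =
      ((PySem.List.enumerate hours 0).foldl bstep (PySem.Dict.empty, 0, 0)).2.2 := rfl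

-- the dict maps each prefix value seen at an index in [1, n] to (first such index) - 1
def DictInv (p : List Int) (n : Nat) (first : PySem.Dict Int Int) : Prop :=
  ∀ v : Int,
    (first.contains v = true ↔ ∃ t : Nat, 1 ≤ t ∧ t ≤ n ∧ p.getD t 0 = v) ∧
    (∀ w : Int, first.get? v = some w → ∃ t0 : Nat, 1 ≤ t0 ∧ t0 ≤ n ∧ p.getD t0 0 = v ∧
      w = (t0 : Int) - 1 ∧ ∀ t : Nat, 1 ≤ t → t < t0 → p.getD t 0 ≠ v)

lemma B_inv (hs : List Int) :
    ((PySem.List.enumerate hs 0).foldl bstep (PySem.Dict.empty, 0, 0)).2.1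
        = (psList 0 hs).getD hs.length 0 ∧
    0 ≤ ((PySem.List.enumerate hs 0).foldl bstep (PySem.Dict.empty, 0, 0)).2.2 ∧
    ACHp (psList 0 hs) ((PySem.List.enumerate hs 0).foldl bstep (PySem.Dict.empty, 0, 0)).2.2 ∧
    UBp (psList 0 hs) ((PySem.List.enumerate hs 0).foldl bstep (PySem.Dict.empty, 0, 0)).2.2 ∧
    DictInv (psList 0 hs) hs.length ((PySem.List.enumerate hs 0).foldl bstep (PySem.Dict.empty, 0, 0)).1 := by
  induction hs using List.reverseRecOn with
  | nil =>
    simp only [PySem.List.enumerate_nil, List.foldl_nil]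
    refine ⟨rfl, le_refl 0, Or.inl rfl, ?_, ?_⟩
    · intro a b hab hbm hpv
      simp [psList] at hbm
      omega
    · intro v
      refine ⟨⟨fun h => ?_, ?_⟩, fun w hw => ?_⟩
      · simp [PySem.Dict.contains_empty] at h
      · rintro ⟨t, h1, h2, -⟩
        simp at h2
        omega
      · simp [PySem.Dict.get?_empty] at hw
  | append_singleton hs x ih =>
    obtain ⟨ihc, ih0, ihach, ihub, ihdict⟩ := ih
    have hplen : (psList 0 hs).length = hs.length + 1 := psList_length 0 hs
    have hsnoc := psList_snoc x hs 0
    have hzero : (psList 0 hs).getD 0 0 = 0 := psList_getD_zero 0 hs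
    set n := hs.length with hn
    set p := psList 0 hs with hpdef
    set c' : Int := p.getD n 0 + dstep x with hc'def
    set p' := psList 0 (hs ++ [x]) with hp'def
    have hplen' : p'.length = n + 2 := by rw [hsnoc]; simp [hplen]
    have hstab : ∀ k : Nat, k ≤ n → p'.getD k 0 = p.getD k 0 := by
      intro k hk
      rw [hsnoc, List.getD_append _ _ _ _ (by omega)]
    have hnew : p'.getD (n + 1) 0 = c' := by
      rw [hsnoc, List.getD_append_right _ _ _ _ (by omega)]
      simp [hplen]
    have hfold : (PySem.List.enumerate (hs ++ [x]) 0).foldl bstep (PySem.Dict.empty, 0, 0)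
        = bstep ((PySem.List.enumerate hs 0).foldl bstep (PySem.Dict.empty, 0, 0)) ((n : Int), x) := by
      rw [PySem.List.enumerate_append]
      simp only [PySem.List.enumerate_cons, PySem.List.enumerate_nil, List.foldl_append,
        List.foldl_cons, List.foldl_nil]
      rw [zero_add, hn]
    set st := (PySem.List.enumerate hs 0).foldl bstep (PySem.Dict.empty, 0, 0) with hst
    have hbs : bstep st ((n : Int), x)
        = (if st.1.contains c' then st.1 else st.1.insert c' (n : Int), c',
           if c' > 0 then (n : Int) + 1
           else if st.1.contains (c' - 1) then max st.2.2 ((n : Int) - st.1.getD (c' - 1) 0)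
           else st.2.2) := by
      simp only [bstep, ihc]
      rw [show p.getD n 0 + (if x > 8 then (1 : Int) else -1) = c' from by rw [hc'def]; rfl]
    have hlen2 : (hs ++ [x]).length = n + 1 := by simp [hn]
    rw [hfold, hbs, hlen2]
    have hansle : st.2.2 ≤ (n : Int) := by
      rcases ihach with h | ⟨a, b, hab, hbm, -, he⟩
      · omega
      · omega
    have hach' : ACHp p' st.2.2 := by
      rcases ihach with h | ⟨a, b, hab, hbm, hpv, he⟩
      · exact Or.inl h
      · exact Or.inr ⟨a, b, hab, by omega,
          by rw [hstab a (by omega), hstab b (by omega)]; exact hpv, he⟩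
    have hubold : ∀ a b : Nat, a < b → b ≤ n → p'.getD a 0 < p'.getD b 0 →
        (b : Int) - (a : Int) ≤ st.2.2 := by
      intro a b hab hb hpv
      rw [hstab a (by omega), hstab b (by omega)] at hpv
      exact ihub a b hab (by omega) hpv
    have hstep' : ∀ k : Nat, k + 1 < p.length →
        p.getD (k + 1) 0 = p.getD k 0 + 1 ∨ p.getD (k + 1) 0 = p.getD k 0 - 1 :=
      fun k hk => psList_pm hs 0 k hk
    have hkey : ∀ a : Nat, a ≤ n → c' ≤ 0 → p.getD a 0 < c' →
        ∃ t : Nat, 1 ≤ t ∧ t ≤ a ∧ p.getD t 0 = c' - 1 := by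
      intro a ha hc0 hpa
      obtain ⟨t, hta, htv⟩ := ivt p hstep' a (c' - 1) (by omega) (by omega) (by omega)
      refine ⟨t, ?_, hta, htv⟩
      by_contra h
      have ht0 : t = 0 := by omega
      rw [ht0, hzero] at htv
      omega
    refine ⟨?_, ?_, ?_, ?_, ?_⟩ <;> dsimp only
    · exact hnew.symm
    · show (0 : Int) ≤ _
      split_ifs with h1 h2
      · omega
      · exact le_trans ih0 (le_max_left _ _)
      · exact ih0
    · show ACHp p' _
      split_ifs with h1 h2
      · refine Or.inr ⟨0, n + 1, by omega, by omega, ?_, by omega⟩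
        rw [hstab 0 (by omega), hzero, hnew]
        omega
      · have hsome : (st.1.get? (c' - 1)).isSome = true := by
          rw [← PySem.Dict.contains_eq_isSome_get? _ _]; exact h2
        obtain ⟨w, hw⟩ := Option.isSome_iff_exists.mp hsome
        obtain ⟨t0, ht01, ht0n, ht0v, hwt0, hmin⟩ := (ihdict (c' - 1)).2 w hw
        rw [PySem.Dict.getD_of_get?_eq_some _ 0 hw]
        by_cases hm : (n : Int) - w ≤ st.2.2
        · rw [max_eq_left hm]; exact hach'
        · rw [max_eq_right (by omega)]
          refine Or.inr ⟨t0, n + 1, by omega, by omega, ?_, by omega⟩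
          rw [hstab t0 ht0n, hnew, ht0v]
          omega
      · exact hach'
    · show UBp p' _
      intro a b hab hbm hpv
      have hble : st.2.2 ≤ (if c' > 0 then (n : Int) + 1
          else if st.1.contains (c' - 1) then max st.2.2 ((n : Int) - st.1.getD (c' - 1) 0)
          else st.2.2) := by
        split_ifs with h1 h2
        · omega
        · exact le_max_left _ _
        · exact le_refl _
      by_cases hb : b ≤ n
      · exact le_trans (hubold a b hab hb hpv) hble
      · have hbeq : b = n + 1 := by omega
        subst hbeq
        split_ifs with h1 h2
        · omega
        · have hpa : p.getD a 0 < c' := by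
            rw [← hstab a (by omega), ← hnew]
            exact hpv
          obtain ⟨t, ht1, hta, htv⟩ := hkey a (by omega) (by omega) hpa
          have hsome : (st.1.get? (c' - 1)).isSome = true := by
            rw [← PySem.Dict.contains_eq_isSome_get? _ _]; exact h2
          obtain ⟨w, hw⟩ := Option.isSome_iff_exists.mp hsome
          obtain ⟨t0, ht01, ht0n, ht0v, hwt0, hmin⟩ := (ihdict (c' - 1)).2 w hw
          rw [PySem.Dict.getD_of_get?_eq_some _ 0 hw]
          have ht0t : t0 ≤ t := by
            by_contra hlt
            exact hmin t ht1 (by omega) htv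
          have hmr : (n : Int) - w ≤ max st.2.2 ((n : Int) - w) := le_max_right _ _
          omega
        · exfalso
          have hpa : p.getD a 0 < c' := by
            rw [← hstab a (by omega), ← hnew]
            exact hpv
          obtain ⟨t, ht1, hta, htv⟩ := hkey a (by omega) (by omega) hpa
          exact h2 ((ihdict (c' - 1)).1.mpr ⟨t, ht1, by omega, htv⟩)
    · show DictInv p' (n + 1) _
      by_cases hc2 : st.1.contains c' = true
      · rw [if_pos hc2]
        intro v
        constructor
        · constructor
          · intro hv
            obtain ⟨t, h1, h2, h3⟩ := (ihdict v).1.mp hv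
            exact ⟨t, h1, by omega, by rw [hstab t h2]; exact h3⟩
          · rintro ⟨t, h1, h2, h3⟩
            by_cases ht : t ≤ n
            · exact (ihdict v).1.mpr ⟨t, h1, ht, by rw [← hstab t ht]; exact h3⟩
            · have hteq : t = n + 1 := by omega
              subst hteq
              rw [hnew] at h3
              rw [← h3]
              exact hc2
        · intro w hw
          obtain ⟨t0, a1, a2, a3, a4, a5⟩ := (ihdict v).2 w hw
          refine ⟨t0, a1, by omega, by rw [hstab t0 a2]; exact a3, a4, ?_⟩
          intro t ht1 htlt
          rw [hstab t (by omega)]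
          exact a5 t ht1 htlt
      · rw [if_neg hc2]
        intro v
        by_cases hv : v = c'
        · subst hv
          constructor
          · constructor
            · intro _
              exact ⟨n + 1, by omega, le_refl _, hnew⟩
            · intro _
              exact PySem.Dict.contains_insert_self _ _ _
          · intro w hw
            rw [PySem.Dict.get?_insert_self _ _ _] at hw
            have hwn : w = (n : Int) := (Option.some.inj hw).symm
            refine ⟨n + 1, by omega, le_refl _, hnew, by omega, ?_⟩
            intro t ht1 htlt
            rw [hstab t (by omega)]
            intro hteq
            exact hc2 ((ihdict c').1.mpr ⟨t, ht1, by omega, hteq⟩)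
        · have hci : (st.1.insert c' (n : Int)).contains v = st.1.contains v := by
            rw [PySem.Dict.contains_insert _ _ _ _]
            simp [hv]
          constructor
          · rw [hci]
            constructor
            · intro hvv
              obtain ⟨t, h1, h2, h3⟩ := (ihdict v).1.mp hvv
              exact ⟨t, h1, by omega, by rw [hstab t h2]; exact h3⟩
            · rintro ⟨t, h1, h2, h3⟩
              by_cases ht : t ≤ n
              · exact (ihdict v).1.mpr ⟨t, h1, ht, by rw [← hstab t ht]; exact h3⟩
              · exfalso
                have hteq : t = n + 1 := by omega
                subst hteq
                rw [hnew] at h3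
                exact hv h3.symm
          · intro w hw
            rw [PySem.Dict.get?_insert_of_ne _ _ hv] at hw
            obtain ⟨t0, a1, a2, a3, a4, a5⟩ := (ihdict v).2 w hw
            refine ⟨t0, a1, by omega, by rw [hstab t0 a2]; exact a3, a4, ?_⟩
            intro t ht1 htlt
            rw [hstab t (by omega)]
            exact a5 t ht1 htlt

-- ===== VERDICT (by name: the statement is the Claim_ definition above) =====
theorem longestWPI_spec : Claim_equal_longestWPI := by
  intro hours _dom
  unfold Spec_longestWPI
  obtain ⟨ha0, haA, haU⟩ := A_props hours
  obtain ⟨-, hb0, hbA, hbU, -⟩ := B_inv hours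
  rw [alt_eq]
  exact max_unique ha0 haU haA hb0 hbU hbA
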